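-- pv_equiv track=rewrite | github.com/Rohit0-07/hackanova5 | research-paper-graph/backend/app/services/parser/extractors/section_detector.py | _normalize_section_names
-- ===== SOURCE A (Python) =====
-- from typing import Dict, List, Tuple
--
-- def _normalize_section_names(sections: Dict[str, str]) -> Dict[str, str]:
--     """Merge alias section names into canonical names."""
--     aliases = {
--         "methods": "methodology",
--         "method": "methodology",
--         "approach": "methodology",
--         "proposed method": "methodology",
--         "conclusions": "conclusion",
--         "experiments": "results",
--         "experimental results": "results",
--         "evaluation": "results",
--         "acknowledgments": "acknowledgements",
--         "bibliography": "references",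
--     }
--     normalized: Dict[str, str] = {}
--     for name, content in sections.items():
--         canonical = aliases.get(name, name)
--         if canonical in normalized:
--             normalized[canonical] += "\n\n" + content
--         else:
--             normalized[canonical] = content
--     return normalized
-- ===== SOURCE B (Python) =====
-- from typing import Dict
--
-- def _normalize_section_names(sections: Dict[str, str]) -> Dict[str, str]:
--     """Merge alias section names into canonical names.
--
--     Different algorithm: first compute the ordered distinct canonical keys,
--     then for each key do a full scan of the sections collecting its fragments
--     (no accumulating dict at all)."""
--     aliases = {
--         "methods": "methodology",
--         "method": "methodology",
--         "approach": "methodology",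
--         "proposed method": "methodology",
--         "conclusions": "conclusion",
--         "experiments": "results",
--         "experimental results": "results",
--         "evaluation": "results",
--         "acknowledgments": "acknowledgements",
--         "bibliography": "references",
--     }
--     def canon(name):
--         return aliases.get(name, name)
--     order = []
--     for name in sections:
--         c = canon(name)
--         if c not in order:
--             order.append(c)
--     return {c: "\n\n".join(content for name, content in sections.items()
--                            if canon(name) == c)
--             for c in order}
-- ===== Notes on version B (the rewrite author's own statement) =====
-- stated objective: alternative
-- what changed: A builds the result in one pass with a dict whose entries are grown by in-place '\n\n' string concatenation; B uses no accumulating dict: it first computes the ordered distinct canonical key list, then for each key does a full scan of the sections collecting that key's fragments and joins them once.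
import Mathlib
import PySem

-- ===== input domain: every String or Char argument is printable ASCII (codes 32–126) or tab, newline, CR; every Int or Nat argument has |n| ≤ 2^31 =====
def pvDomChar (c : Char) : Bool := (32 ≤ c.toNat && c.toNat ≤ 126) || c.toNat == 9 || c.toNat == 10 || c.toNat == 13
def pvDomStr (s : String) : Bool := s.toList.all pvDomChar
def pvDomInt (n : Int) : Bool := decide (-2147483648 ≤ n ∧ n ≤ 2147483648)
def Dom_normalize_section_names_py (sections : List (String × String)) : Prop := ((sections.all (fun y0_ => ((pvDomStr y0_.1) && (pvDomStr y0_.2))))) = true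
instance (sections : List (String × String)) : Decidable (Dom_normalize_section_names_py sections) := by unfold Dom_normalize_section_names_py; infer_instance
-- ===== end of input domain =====

-- B replaces A's single accumulating dict (in-place '\n\n' concatenation) by:
-- ordered distinct canonical keys first, then one full scan per key gathering
-- and joining its fragments; same results, no speed claim.

-- the alias table both Pythons define literally
def pvAliases : PySem.Dict String String := PySem.Dict.ofList [
  ("methods", "methodology"),
  ("method", "methodology"),
  ("approach", "methodology"),
  ("proposed method", "methodology"),
  ("conclusions", "conclusion"),
  ("experiments", "results"),
  ("experimental results", "results"),
  ("evaluation", "results"),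
  ("acknowledgments", "acknowledgements"),
  ("bibliography", "references")]

-- ===== PORT A =====
def normalize_section_names_py (sections : List (String × String)) : List (String × String) :=
  (sections.foldl (fun normalized nc =>
      let canonical := pvAliases.getD nc.1 nc.1
      if normalized.contains canonical then
        -- normalized[canonical] += "\n\n" + content  (key present, so getD reads the stored value)
        normalized.insert canonical (normalized.getD canonical "" ++ "\n\n" ++ nc.2)
      else
        normalized.insert canonical nc.2)
    PySem.Dict.empty).items

-- ===== PORT B =====
-- canon(name) = aliases.get(name, name)
def pvCanon (n : String) : String := pvAliases.getD n n

def normalize_section_names_py_alt (sections : List (String × String)) : List (String × String) :=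
  -- phase 1: ordered distinct canonical keys ('if c not in order: order.append(c)')
  let order := sections.foldl (fun acc nc =>
      if acc.contains (pvCanon nc.1) then acc else acc ++ [pvCanon nc.1]) ([] : List String)
  -- phase 2: per key, scan all sections and join its fragments
  order.map (fun c => (c,
    PySem.Str.join "\n\n" ((sections.filter (fun nc => pvCanon nc.1 == c)).map (·.2))))

-- ===== PRECONDITION & SPEC =====
def Spec_normalize_section_names_py (sections : List (String × String)) (out : List (String × String)) : Prop := out = normalize_section_names_py_alt sections
instance (sections : List (String × String)) (out : List (String × String)) : Decidable (Spec_normalize_section_names_py sections out) := by unfold Spec_normalize_section_names_py; infer_instance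

-- ===== CLAIM (what is proved, stated in full; the proofs are below) =====
def Claim_equal_normalize_section_names_py : Prop := ∀ (sections : List (String × String)), Dom_normalize_section_names_py sections → Spec_normalize_section_names_py sections (normalize_section_names_py sections)

-- ===== LEMMAS AND PROOFS =====

lemma chars_join_append_last (sep cl : List Char) :
    ∀ (L : List (List Char)), L ≠ [] →
      PySem.Chars.join sep (L ++ [cl]) = PySem.Chars.join sep L ++ sep ++ cl := by
  intro L
  induction L with
  | nil => intro h; exact absurd rfl h
  | cons h1 t ih =>
    intro _
    cases t with
    | nil =>
      simp only [List.cons_append, List.nil_append, PySem.Chars.join_cons_cons,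
        PySem.Chars.join_singleton]
    | cons h2 t2 =>
      simp only [List.cons_append] at *
      rw [PySem.Chars.join_cons_cons, ih (by simp), PySem.Chars.join_cons_cons]
      simp [List.append_assoc]

lemma str_join_append_last (l : List String) (c : String) (h : l ≠ []) :
    PySem.Str.join "\n\n" (l ++ [c]) = PySem.Str.join "\n\n" l ++ "\n\n" ++ c := by
  apply String.toList_injective
  rw [PySem.Str.toList_join, List.map_append, List.map_cons, List.map_nil,
    chars_join_append_last _ _ _ (by simpa using h)]
  simp [PySem.Str.toList_join]

lemma str_join_singleton (c : String) : PySem.Str.join "\n\n" [c] = c := by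
  apply String.toList_injective
  rw [PySem.Str.toList_join]
  simp [PySem.Chars.join_singleton]

-- A's accumulating dict of strings tracks the fragment-list dict, joined.
lemma fold_inv (l : List (String × String)) (dA : PySem.Dict String String)
    (dB : PySem.Dict String (List String))
    (hit : dA.items = dB.items.map (fun p => (p.1, PySem.Str.join "\n\n" p.2)))
    (hnd : dB.keys.Nodup)
    (hne : ∀ p ∈ dB.items, p.2 ≠ ([] : List String)) :
    (l.foldl (fun normalized nc =>
        let canonical := pvAliases.getD nc.1 nc.1
        if normalized.contains canonical then
          normalized.insert canonical (normalized.getD canonical "" ++ "\n\n" ++ nc.2)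
        else
          normalized.insert canonical nc.2) dA).items
      = ((l.foldl (fun groups nc =>
            groups.modify (pvCanon nc.1) [] (· ++ [nc.2])) dB).items).map
          (fun p => (p.1, PySem.Str.join "\n\n" p.2)) := by
  induction l generalizing dA dB with
  | nil => simpa using hit
  | cons nc rest ih =>
    simp only [List.foldl_cons]
    have hkeys : dA.keys = dB.keys := by
      simp only [PySem.Dict.keys, hit, List.map_map]; rfl
    have hndA : dA.keys.Nodup := by rw [hkeys]; exact hnd
    set k := pvCanon nc.1 with hk
    have hcont : dA.contains k = dB.contains k := by
      rw [PySem.Dict.contains_eq_decide_mem_keys, PySem.Dict.contains_eq_decide_mem_keys, hkeys]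
    refine ih _ _ ?_ ?_ ?_
    · show (if dA.contains k then
              dA.insert k (dA.getD k "" ++ "\n\n" ++ nc.2)
            else dA.insert k nc.2).items
         = (dB.insert k (dB.getD k [] ++ [nc.2])).items.map
             (fun p => (p.1, PySem.Str.join "\n\n" p.2))
      by_cases hc : dB.contains k = true
      · rw [hcont, if_pos hc]
        have hkmem : k ∈ dB.items.map Prod.fst := by
          have := hc
          rw [PySem.Dict.contains_eq_decide_mem_keys] at this
          simpa [PySem.Dict.keys] using this
        obtain ⟨p, hpmem, hpk⟩ := List.mem_map.mp hkmem
        obtain ⟨pk, pv⟩ := p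
        simp only at hpk
        subst hpk
        have hvB : dB.getD k [] = pv := PySem.Dict.getD_of_mem_items _ hpmem hnd []
        have hjA : (k, PySem.Str.join "\n\n" pv) ∈ dA.items := by
          rw [hit]; exact List.mem_map_of_mem hpmem
        have hvA : dA.getD k "" = PySem.Str.join "\n\n" pv :=
          PySem.Dict.getD_of_mem_items _ hjA hndA ""
        have hpvne : pv ≠ [] := hne _ hpmem
        rw [PySem.Dict.items_insert_of_contains _ _ (by rw [hcont]; exact hc),
          PySem.Dict.items_insert_of_contains _ _ hc, hit, List.map_map, List.map_map]
        refine List.map_congr_left ?_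
        rintro ⟨qk, qv⟩ hq
        by_cases hqk : qk = k
        · subst hqk
          simp [hvA, hvB, str_join_append_last pv nc.2 hpvne]
        · simp [hqk]
      · have hc' : dB.contains k = false := by simpa using hc
        have hcA : dA.contains k = false := by rw [hcont]; exact hc'
        have hgd : dB.getD k ([] : List String) = [] := by
          rw [PySem.Dict.getD_of_not_contains]; exact hc'
        rw [if_neg (by simp [hcA]),
          PySem.Dict.items_insert_of_not_contains _ _ hcA,
          PySem.Dict.items_insert_of_not_contains _ _ hc',
          hgd, hit, List.map_append]
        simp [str_join_singleton]
    · exact PySem.Dict.nodup_keys_insert _ _ _ hnd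
    · intro p hp
      rw [show (dB.modify k [] (· ++ [nc.2])) = dB.insert k (dB.getD k [] ++ [nc.2]) from rfl,
        PySem.Dict.mem_items_insert] at hp
      rcases hp with h | ⟨h, _⟩
      · subst h; simp
      · exact hne _ h

-- the fragment-list dict's items ARE B's (ordered distinct keys, per-key filter)
lemma groups_items (sections : List (String × String)) :
    ((sections.foldl (fun g nc => g.modify (pvCanon nc.1) [] (· ++ [nc.2]))
        PySem.Dict.empty).items)
  = (sections.foldl (fun acc nc =>
        if acc.contains (pvCanon nc.1) then acc else acc ++ [pvCanon nc.1]) ([] : List String)).map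
      (fun c => (c, (sections.filter (fun nc => pvCanon nc.1 == c)).map (·.2))) := by
  set G := sections.foldl (fun g nc => g.modify (pvCanon nc.1) [] (· ++ [nc.2]))
    PySem.Dict.empty with hG
  have hnd : G.keys.Nodup :=
    PySem.Dict.nodup_keys_foldl_modify_key sections (fun nc => pvCanon nc.1) _ _ _
      PySem.Dict.nodup_keys_empty
  rw [PySem.Dict.items_eq_map_keys G hnd []]
  have hkeys : G.keys = sections.foldl (fun acc nc =>
      if acc.contains (pvCanon nc.1) then acc else acc ++ [pvCanon nc.1]) ([] : List String) := by
    rw [hG, PySem.Dict.keys_foldl_modify_key, PySem.Dict.keys_empty,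
      PySem.Set.update_nil_left, PySem.Set.ofList_eq_foldl, List.foldl_map]
    rfl
  have hgetD : ∀ c, G.getD c [] = (sections.filter (fun nc => pvCanon nc.1 == c)).map (·.2) := by
    intro c
    have : G = (sections.map (fun nc => (pvCanon nc.1, nc.2))).foldl
        (fun d p => d.modify p.1 [] (· ++ [p.2])) PySem.Dict.empty := by
      rw [hG, List.foldl_map]
    rw [this, PySem.Dict.getD_foldl_modify_append, PySem.Dict.getD_empty,
      List.filter_map, List.map_map]
    rfl
  rw [hkeys]
  exact List.map_congr_left (fun c _ => by rw [hgetD c])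

-- ===== VERDICT (by name: the statement is the Claim_ definition above) =====
theorem normalize_section_names_py_spec : Claim_equal_normalize_section_names_py := by
  intro sections _
  show normalize_section_names_py sections = normalize_section_names_py_alt sections
  unfold normalize_section_names_py normalize_section_names_py_alt
  rw [fold_inv sections PySem.Dict.empty PySem.Dict.empty rfl
      PySem.Dict.nodup_keys_empty (by intro p hp; simp [PySem.Dict.empty] at hp),
    groups_items, List.map_map]
  rfl
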